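-- pv_equiv track=rewrite | github.com/saro2808/Python-2020 | encryptor.py | word_to_keyword
-- ===== SOURCE A (Python) =====
-- import string
--
-- space_punct_list = string.punctuation + string.whitespace
--
-- def is_latin(s: str) -> bool:
--     return (ord('A') <= ord(s) < ord('A') + 26) or (ord('a') <= ord(s) < ord('a') + 26)
--
-- def is_cyrillic(s: str) -> bool:
--     return ord('А') <= ord(s) <= ord('Я') or ord('а') <= ord(s) <= ord('я')
--
-- def word_to_keyword(s: str, key: str) -> str:
--     s_ret = ''
--     s_len = len(s)
--     k_len = len(key)
--     i = 0
--     r = 0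
--     while i < s_len:
--         while i < s_len and not is_latin(s[i]) and not is_cyrillic(s[i]) and s[i] not in space_punct_list:
--             s_ret += s[i]
--             i += 1
--
--         w_len = 0
--         while i < s_len and (is_latin(s[i]) or is_cyrillic(s[i]) or s[i] in space_punct_list):
--             w_len += 1
--             i += 1
--
--         delta = k_len - r
--         if delta > w_len:
--             s_ret += key[r:w_len + r]
--             r = w_len + r
--             continue
--         #  else:
--         s_ret += key[r:k_len]
--         q = (w_len - delta) // k_len
--         r = (w_len - delta) % k_len
--         s_ret += key * q + key[0:r]
--
--     return s_ret
-- ===== SOURCE B (Python) =====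
-- import string
--
-- space_punct_list = string.punctuation + string.whitespace
--
-- def is_latin(s: str) -> bool:
--     return (ord('A') <= ord(s) < ord('A') + 26) or (ord('a') <= ord(s) < ord('a') + 26)
--
-- def is_cyrillic(s: str) -> bool:
--     return ord('А') <= ord(s) <= ord('Я') or ord('а') <= ord(s) <= ord('я')
--
-- def word_to_keyword(s: str, key: str) -> str:
--     k_len = len(key)
--     out = []
--     r = 0
--     for c in s:
--         if is_latin(c) or is_cyrillic(c) or c in space_punct_list:
--             out.append(key[r % k_len])
--             r += 1
--         else:
--             out.append(c)
--     return ''.join(out)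
-- ===== Notes on version B (the rewrite author's own statement) =====
-- stated objective: simpler
-- what changed: Replaced the nested run-finding while-loops and the quotient/remainder bulk key-slice arithmetic (key[r:..] + key*q + key[0:r]) with one flat pass over the characters that keeps a single persistent counter r and emits key[r % k_len] per word character, building the result in a list joined once.
-- crash fix: On an empty key with a nonempty s consisting only of non-word characters (not Latin/Cyrillic/punctuation/whitespace), A raises ZeroDivisionError from (w_len-delta)//k_len while B never consults the key and returns s unchanged. — e.g. on word_to_keyword("07", ""): A raises ZeroDivisionError, B returns "07"
import Mathlib
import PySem

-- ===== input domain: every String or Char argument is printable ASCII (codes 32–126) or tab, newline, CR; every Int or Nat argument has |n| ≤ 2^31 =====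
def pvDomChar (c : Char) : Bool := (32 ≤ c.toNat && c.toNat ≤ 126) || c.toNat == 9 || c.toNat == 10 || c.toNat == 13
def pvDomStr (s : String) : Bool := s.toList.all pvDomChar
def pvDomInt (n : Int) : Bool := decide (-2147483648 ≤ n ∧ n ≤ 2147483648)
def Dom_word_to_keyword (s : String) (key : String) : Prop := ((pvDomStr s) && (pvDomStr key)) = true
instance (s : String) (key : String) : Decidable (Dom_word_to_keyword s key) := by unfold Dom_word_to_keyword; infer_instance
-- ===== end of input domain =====

-- B replaces A's nested run-finding loops and bulk key-slice arithmetic by one flat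
-- character loop with a persistent counter, for simplicity (same asymptotic cost).

-- ===== PORT A =====
-- string.punctuation + string.whitespace
def spacePunct : List Char := "!\"#$%&'()*+,-./:;<=>?@[\\]^_`{|}~ \t\n\r\x0B\x0C".toList

def isLatin (c : Char) : Bool :=
  ('A'.toNat ≤ c.toNat && c.toNat < 'A'.toNat + 26) || ('a'.toNat ≤ c.toNat && c.toNat < 'a'.toNat + 26)

def isCyrillic (c : Char) : Bool :=
  ('А'.toNat ≤ c.toNat && c.toNat ≤ 'Я'.toNat) || ('а'.toNat ≤ c.toNat && c.toNat ≤ 'я'.toNat)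

-- the disjunction tested by both Pythons: is_latin(c) or is_cyrillic(c) or c in space_punct_list
def wordish (c : Char) : Bool := isLatin c || isCyrillic c || spacePunct.contains c

-- termination helper cited by loopA's decreasing_by
theorem rest2_lt (x : Char) (xs : List Char) :
    (((x :: xs).dropWhile (fun c => !wordish c)).dropWhile wordish).length < (x :: xs).length := by
  by_cases h : wordish x
  · rw [List.dropWhile_cons]
    simp only [h, Bool.not_true, if_neg, Bool.false_eq_true, not_false_iff]
    rw [List.dropWhile_cons]
    simp only [h, ite_true]
    exact Nat.lt_succ_of_le (List.length_dropWhile_le wordish xs)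
  · rw [List.dropWhile_cons]
    simp only [h, Bool.not_false, ite_true]
    exact Nat.lt_succ_of_le (le_trans (List.length_dropWhile_le wordish _) (List.length_dropWhile_le _ xs))

-- A's outer while loop; the two inner character-consuming while loops are the takeWhile/dropWhile pairs
def loopA (key : List Char) (rem : List Char) (r : Int) (acc : List Char) : List Char :=
  match rem with
  | [] => acc
  | x :: xs =>
    let pre := (x :: xs).takeWhile (fun c => !wordish c)
    let rest1 := (x :: xs).dropWhile (fun c => !wordish c)
    let w := rest1.takeWhile wordish
    let rest2 := rest1.dropWhile wordish
    let wlen : Int := (w.length : Int)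
    let klen : Int := (key.length : Int)
    let delta := klen - r
    if delta > wlen then
      loopA key rest2 (wlen + r) (acc ++ pre ++ PySem.List.slice key (some r) (some (wlen + r)))
    else
      -- q = (w_len - delta) // k_len ; r = (w_len - delta) % k_len; key * q ported as flatten (replicate q.toNat key)
      let q := PySem.Int.floordiv (wlen - delta) klen
      let r' := PySem.Int.mod (wlen - delta) klen
      loopA key rest2 r'
        (acc ++ pre ++ PySem.List.slice key (some r) (some klen) ++
          (List.replicate q.toNat key).flatten ++ PySem.List.slice key (some 0) (some r'))
termination_by rem.length
decreasing_by all_goals exact rest2_lt x xs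

def word_to_keyword (s : String) (key : String) : String :=
  String.ofList (loopA key.toList s.toList 0 [])

-- ===== PORT B =====
-- one flat loop: per word character append key[r % k_len] (in range whenever key ≠ ''), else the character
def stepB (key : List Char) (st : Int × List Char) (c : Char) : Int × List Char :=
  if wordish c then
    (st.1 + 1, st.2 ++ [(PySem.List.pyGet? key (PySem.Int.mod st.1 (key.length : Int))).getD c])
  else (st.1, st.2 ++ [c])

def word_to_keyword_alt (s : String) (key : String) : String :=
  String.ofList (s.toList.foldl (stepB key.toList) (0, [])).2

-- ===== PRECONDITION & SPEC =====
-- A raises ZeroDivisionError exactly when key is empty and s is nonempty; those inputs are excluded.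
def Pre_word_to_keyword (s : String) (key : String) : Prop := key ≠ "" ∨ s = ""
instance (s : String) (key : String) : Decidable (Pre_word_to_keyword s key) := by
  unfold Pre_word_to_keyword; infer_instance

def pvWitness_word_to_keyword : String × String := ("ab, cd!", "xyz")

-- On an empty key with nonempty s made only of non-word characters, A raises ZeroDivisionError
-- from (w_len - delta) // k_len while B never consults the key and returns s unchanged.
def Raises_word_to_keyword (s : String) (key : String) : Prop :=
  key = "" ∧ s ≠ "" ∧ s.toList.all (fun c => !wordish c) = true
instance (s : String) (key : String) : Decidable (Raises_word_to_keyword s key) := by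
  unfold Raises_word_to_keyword; infer_instance
def pvRaiseWitness_word_to_keyword : String × String := ("07", "")
def pvRaiseWitnessOut_word_to_keyword : String := "07"

def Spec_word_to_keyword (s : String) (key : String) (out : String) : Prop := out = word_to_keyword_alt s key
instance (s : String) (key : String) (out : String) : Decidable (Spec_word_to_keyword s key out) := by
  unfold Spec_word_to_keyword; infer_instance

-- ===== CLAIM (what is proved, stated in full; the proofs are below) =====
def Claim_equal_word_to_keyword : Prop := ∀ (s : String) (key : String), Dom_word_to_keyword s key → Pre_word_to_keyword s key → Spec_word_to_keyword s key (word_to_keyword s key)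

def Claim_raises_word_to_keyword : Prop := (∀ (s : String) (key : String), Dom_word_to_keyword s key → Raises_word_to_keyword s key → ¬ Pre_word_to_keyword s key) ∧ (Dom_word_to_keyword (pvRaiseWitness_word_to_keyword.1) (pvRaiseWitness_word_to_keyword.2) ∧ Raises_word_to_keyword (pvRaiseWitness_word_to_keyword.1) (pvRaiseWitness_word_to_keyword.2) ∧ word_to_keyword_alt (pvRaiseWitness_word_to_keyword.1) (pvRaiseWitness_word_to_keyword.2) = pvRaiseWitnessOut_word_to_keyword)

-- ===== LEMMAS AND PROOFS =====


-- proof-side keystream: the j-th key character B emits starting from counter r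
def chunk (key : List Char) (r : Int) (n : Nat) : List Char :=
  (List.range n).map (fun (j : Nat) => key.getD ((r + (j:Int)) % (key.length : Int)).toNat ' ')

theorem chunk_congr (key : List Char) (r r' : Int) (n : Nat)
    (h : r % (key.length : Int) = r' % (key.length : Int)) : chunk key r n = chunk key r' n := by
  unfold chunk
  have hj : ∀ j : Nat, (r + (j:Int)) % (key.length : Int) = (r' + (j:Int)) % (key.length : Int) := by
    intro j; rw [← Int.emod_add_emod, h, Int.emod_add_emod]
  simp only [hj]

theorem chunk_succ (key : List Char) (r : Int) (n : Nat) :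
    chunk key r (n + 1) = key.getD (r % (key.length : Int)).toNat ' ' :: chunk key (r + 1) n := by
  unfold chunk
  rw [List.range_succ_eq_map, List.map_cons, List.map_map]
  simp only [Nat.cast_zero, add_zero]
  congr 1
  apply List.map_congr_left
  intro j _
  simp only [Function.comp_apply]
  have e : r + ((Nat.succ j : Nat) : Int) = r + 1 + (j : Int) := by push_cast; ring
  rw [e]

theorem chunk_split (key : List Char) (r : Int) (m n : Nat) :
    chunk key r (m + n) = chunk key r m ++ chunk key (r + (m:Int)) n := by
  unfold chunk
  rw [List.range_add, List.map_append, List.map_map]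
  congr 1
  apply List.map_congr_left
  intro j _
  simp only [Function.comp_apply]
  have e : r + ((m + j : Nat) : Int) = r + (m : Int) + (j : Int) := by push_cast; ring
  rw [e]

theorem chunk_in_range (key : List Char) (r : Int) (n : Nat) (h0 : 0 ≤ r)
    (h : r + (n:Int) ≤ (key.length : Int)) :
    chunk key r n = (key.drop r.toNat).take n := by
  apply List.ext_getElem
  · simp [chunk]; omega
  · intro j hj1 hj2
    simp only [chunk, List.getElem_map, List.getElem_range, List.getElem_take, List.getElem_drop]
    have hlt : r + (j:Int) < (key.length : Int) := by
      simp [chunk] at hj1; omega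
    have hmod : (r + (j:Int)) % (key.length : Int) = r + (j:Int) := by
      apply Int.emod_eq_of_lt (by omega) hlt
    rw [hmod]
    have hN : (r + (j:Int)).toNat = r.toNat + j := by omega
    rw [hN]
    exact List.getD_eq_getElem key ' ' (by omega)

theorem chunk_cycle (key : List Char) (r : Int) (_h0 : 0 ≤ r)
    (hr : r % (key.length : Int) = 0) : chunk key r key.length = key := by
  apply List.ext_getElem
  · simp [chunk]
  · intro j hj1 hj2
    simp only [chunk, List.getElem_map, List.getElem_range]
    have hmod : (r + (j:Int)) % (key.length : Int) = (j:Int) := by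
      rw [← Int.emod_add_emod, hr, zero_add]
      exact Int.emod_eq_of_lt (by omega) (by exact_mod_cast hj2)
    rw [hmod]
    have hN : ((j:Int)).toNat = j := by omega
    rw [hN]
    exact List.getD_eq_getElem key ' ' hj2

theorem chunk_cycles (key : List Char) (q : Nat) (r : Int) (h0 : 0 ≤ r)
    (hr : r % (key.length : Int) = 0) :
    chunk key r (q * key.length) = (List.replicate q key).flatten := by
  induction q generalizing r with
  | zero => simp [chunk]
  | succ q ih =>
    have hsplit : (q + 1) * key.length = key.length + q * key.length := by ring
    rw [hsplit, chunk_split, chunk_cycle key r h0 hr, List.replicate_succ, List.flatten_cons]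
    congr 1
    apply ih
    · omega
    · rw [← Int.emod_add_emod, hr, zero_add, Int.emod_self]

theorem foldB_nonword_run (key : List Char) (pre : List Char) :
    ∀ (t : List Char) (rB : Int) (acc : List Char), (∀ c ∈ pre, wordish c = false) →
    List.foldl (stepB key) (rB, acc) (pre ++ t) = List.foldl (stepB key) (rB, acc ++ pre) t := by
  induction pre with
  | nil => intro t rB acc _; simp
  | cons c pre ih =>
    intro t rB acc hall
    have hc : wordish c = false := hall c (by simp)
    simp only [List.cons_append, List.foldl_cons, stepB, hc, Bool.false_eq_true, if_false]
    rw [ih t rB (acc ++ [c]) (fun d hd => hall d (by simp [hd]))]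
    simp

theorem foldB_word_run (key : List Char) (hk : 0 < key.length) (w : List Char) :
    ∀ (t : List Char) (rB : Int) (acc : List Char), 0 ≤ rB → (∀ c ∈ w, wordish c = true) →
    List.foldl (stepB key) (rB, acc) (w ++ t) =
      List.foldl (stepB key) (rB + (w.length : Int), acc ++ chunk key rB w.length) t := by
  induction w with
  | nil => intro t rB acc _ _; simp [chunk]
  | cons c w ih =>
    intro t rB acc hrB hall
    have hc : wordish c = true := hall c (by simp)
    have hkI : (0:Int) < (key.length : Int) := by exact_mod_cast hk
    have hmodeq : PySem.Int.mod rB (key.length : Int) = rB % (key.length : Int) :=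
      PySem.Int.mod_eq_emod_of_pos hkI
    have h0 : 0 ≤ rB % (key.length : Int) := Int.emod_nonneg rB (by omega)
    have h1 : rB % (key.length : Int) < (key.length : Int) := Int.emod_lt_of_pos rB hkI
    have hget : (PySem.List.pyGet? key (PySem.Int.mod rB (key.length : Int))).getD c
        = key.getD (rB % (key.length : Int)).toNat ' ' := by
      rw [hmodeq, PySem.List.pyGet?_of_nonneg key h0,
        List.getElem?_eq_getElem (by omega), Option.getD_some,
        List.getD_eq_getElem key ' ' (by omega)]
    simp only [List.cons_append, List.foldl_cons, stepB, hc, if_true, hget]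
    rw [ih t (rB + 1) _ (by omega) (fun d hd => hall d (by simp [hd]))]
    have e1 : rB + (((w.length + 1 : Nat)) : Int) = rB + 1 + (w.length : Int) := by push_cast; ring
    simp only [List.length_cons, e1, chunk_succ, List.append_assoc, List.singleton_append]

-- unfolding lemma for loopA on a nonempty list
theorem loopA_cons (key : List Char) (x : Char) (xs : List Char) (r : Int) (acc : List Char) :
    loopA key (x :: xs) r acc =
      (if (key.length : Int) - r > (((((x :: xs).dropWhile (fun c => !wordish c)).takeWhile wordish).length : Int)) then
        loopA key (((x :: xs).dropWhile (fun c => !wordish c)).dropWhile wordish)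
          ((((((x :: xs).dropWhile (fun c => !wordish c)).takeWhile wordish).length : Int)) + r)
          (acc ++ (x :: xs).takeWhile (fun c => !wordish c) ++
            PySem.List.slice key (some r) (some ((((((x :: xs).dropWhile (fun c => !wordish c)).takeWhile wordish).length : Int)) + r)))
      else
        loopA key (((x :: xs).dropWhile (fun c => !wordish c)).dropWhile wordish)
          (PySem.Int.mod ((((((x :: xs).dropWhile (fun c => !wordish c)).takeWhile wordish).length : Int)) - ((key.length : Int) - r)) (key.length : Int))
          (acc ++ (x :: xs).takeWhile (fun c => !wordish c) ++
            PySem.List.slice key (some r) (some (key.length : Int)) ++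
            (List.replicate (PySem.Int.floordiv ((((((x :: xs).dropWhile (fun c => !wordish c)).takeWhile wordish).length : Int)) - ((key.length : Int) - r)) (key.length : Int)).toNat key).flatten ++
            PySem.List.slice key (some 0) (some (PySem.Int.mod ((((((x :: xs).dropWhile (fun c => !wordish c)).takeWhile wordish).length : Int)) - ((key.length : Int) - r)) (key.length : Int))))) := by
  rw [loopA]

theorem loopA_eq (key : List Char) (hk : 0 < key.length) :
    ∀ (n : Nat) (rem : List Char), rem.length ≤ n → ∀ (rB : Int) (acc : List Char), 0 ≤ rB →
    loopA key rem (rB % (key.length : Int)) acc = (List.foldl (stepB key) (rB, acc) rem).2 := by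
  intro n
  induction n with
  | zero =>
    intro rem h rB acc _
    have : rem = [] := List.eq_nil_of_length_eq_zero (Nat.le_zero.mp h)
    subst this
    simp [loopA]
  | succ n ih =>
    intro rem hlen rB acc hrB
    match rem with
    | [] => simp [loopA]
    | x :: xs =>
      have hkI : (0:Int) < (key.length : Int) := by exact_mod_cast hk
      rw [loopA_cons]
      set rest1 := (x :: xs).dropWhile (fun c => !wordish c) with hrest1
      set pre := (x :: xs).takeWhile (fun c => !wordish c) with hpre
      set w := rest1.takeWhile wordish with hw
      set rest2 := rest1.dropWhile wordish with hrest2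
      have hdec : (x :: xs) = pre ++ (w ++ rest2) := by
        rw [hpre, hw, hrest2, hrest1, List.takeWhile_append_dropWhile, List.takeWhile_append_dropWhile]
      have hprem : ∀ c ∈ pre, wordish c = false := by
        intro c hc
        have := List.mem_takeWhile_imp hc
        simpa using this
      have hwm : ∀ c ∈ w, wordish c = true := fun c hc => List.mem_takeWhile_imp hc
      have hlen2 : rest2.length ≤ n := by
        have := rest2_lt x xs
        simp only [← hrest1, ← hrest2] at this
        omega
      have hA0 : 0 ≤ rB % (key.length : Int) := Int.emod_nonneg rB (by omega)
      have hA1 : rB % (key.length : Int) < (key.length : Int) := Int.emod_lt_of_pos rB hkI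
      have hAA : (rB % (key.length : Int)) % (key.length : Int) = rB % (key.length : Int) :=
        Int.emod_emod_of_dvd rB dvd_rfl
      -- B side
      conv_rhs => rw [hdec]
      rw [foldB_nonword_run key pre (w ++ rest2) rB acc hprem,
        foldB_word_run key hk w rest2 rB (acc ++ pre) hrB hwm]
      have hchcongr : chunk key rB w.length = chunk key (rB % (key.length : Int)) w.length :=
        chunk_congr key rB (rB % (key.length : Int)) w.length (by rw [hAA])
      rw [hchcongr]
      by_cases hb : (key.length : Int) - rB % (key.length : Int) > (w.length : Int)
      · rw [if_pos hb]
        have hsl : PySem.List.slice key (some (rB % (key.length : Int))) (some ((w.length : Int) + rB % (key.length : Int)))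
            = chunk key (rB % (key.length : Int)) w.length := by
          rw [PySem.List.slice_toNat key hA0 (by omega),
            chunk_in_range key (rB % (key.length : Int)) w.length hA0 (by omega)]
          congr 1
          omega
        have hr : (w.length : Int) + rB % (key.length : Int) = (rB + (w.length : Int)) % (key.length : Int) := by
          have h2 : 0 ≤ rB % (key.length : Int) + (w.length : Int) := by omega
          have h3 : rB % (key.length : Int) + (w.length : Int) < (key.length : Int) := by omega
          rw [← Int.emod_add_emod, Int.emod_eq_of_lt h2 h3]
          ring
        rw [hsl, hr, List.append_assoc]
        exact ih rest2 hlen2 (rB + (w.length : Int)) _ (by omega)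
      · rw [if_neg hb]
        set rA := rB % (key.length : Int) with hrA
        set m := (w.length : Int) - ((key.length : Int) - rA) with hm
        have hm0 : 0 ≤ m := by omega
        rw [PySem.Int.floordiv_eq_ediv_of_pos hkI, PySem.Int.mod_eq_emod_of_pos hkI]
        have hq0 : 0 ≤ m / (key.length : Int) := Int.ediv_nonneg hm0 (by omega)
        have hr'0 : 0 ≤ m % (key.length : Int) := Int.emod_nonneg m (by omega)
        have hr'1 : m % (key.length : Int) < (key.length : Int) := Int.emod_lt_of_pos m hkI
        have hmeq : (key.length : Int) * (m / (key.length : Int)) + m % (key.length : Int) = m :=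
          Int.mul_ediv_add_emod m (key.length : Int)
        have e2 : (((m / (key.length : Int)).toNat * key.length : Nat) : Int)
            = (key.length : Int) * (m / (key.length : Int)) := by
          push_cast [Int.toNat_of_nonneg hq0]
          ring
        -- Nat decomposition of the word-run length
        have hsplitN : w.length = (key.length - rA.toNat) +
            ((m / (key.length : Int)).toNat * key.length + (m % (key.length : Int)).toNat) := by
          have hI : (w.length : Int) = ((key.length - rA.toNat : Nat) : Int) +
              (((m / (key.length : Int)).toNat * key.length : Nat) : Int) +
              (((m % (key.length : Int)).toNat : Nat) : Int) := by
            rw [e2]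
            omega
          omega
        -- piece 1: key[r:k_len] is the keystream from rA to the end of key
        have hp1 : PySem.List.slice key (some rA) (some (key.length : Int))
            = chunk key rA (key.length - rA.toNat) := by
          rw [PySem.List.slice_toNat key hA0 (by omega),
            chunk_in_range key rA (key.length - rA.toNat) hA0 (by omega)]
          congr 1
        -- piece 2: key * q is the keystream over q full cycles
        have hp2 : (List.replicate (m / (key.length : Int)).toNat key).flatten
            = chunk key (rA + ((key.length - rA.toNat : Nat) : Int)) ((m / (key.length : Int)).toNat * key.length) := by
          rw [chunk_cycles key _ _ (by omega)]
          rw [show rA + ((key.length - rA.toNat : Nat) : Int) = (key.length : Int) by omega, Int.emod_self]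
        -- piece 3: key[0:r'] is the keystream for the final partial cycle
        have hp3 : PySem.List.slice key (some 0) (some (m % (key.length : Int)))
            = chunk key (rA + ((key.length - rA.toNat : Nat) : Int) + ((m / (key.length : Int)).toNat * key.length : Nat))
                (m % (key.length : Int)).toNat := by
          rw [chunk_congr key _ 0 _ (by
            rw [Int.zero_emod]
            rw [show rA + ((key.length - rA.toNat : Nat) : Int) + (((m / (key.length : Int)).toNat * key.length : Nat) : Int)
              = (key.length : Int) + (key.length : Int) * (m / (key.length : Int)) by rw [e2]; omega]
            rw [Int.add_mul_emod_self_left, Int.emod_self])]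
          rw [chunk_in_range key 0 _ (le_refl 0) (by omega)]
          rw [PySem.List.slice_toNat key (le_refl 0) hr'0]
          simp
        have hchunk : chunk key rA w.length =
            PySem.List.slice key (some rA) (some (key.length : Int)) ++
            (List.replicate (m / (key.length : Int)).toNat key).flatten ++
            PySem.List.slice key (some 0) (some (m % (key.length : Int))) := by
          rw [hp1, hp2, hp3, hsplitN, chunk_split, chunk_split, List.append_assoc]
        have hrnew : m % (key.length : Int) = (rB + (w.length : Int)) % (key.length : Int) := by
          have h1 : m = ((w.length : Int) + rA) + (key.length : Int) * (-1) := by rw [hm]; ring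
          have h2 : m % (key.length : Int) = (rA + (w.length : Int)) % (key.length : Int) := by
            rw [h1, Int.add_mul_emod_self_left]
            congr 1
            ring
          rw [h2, hrA, Int.emod_add_emod]
        rw [hchunk, hrnew]
        simp only [List.append_assoc]
        exact ih rest2 hlen2 (rB + (w.length : Int)) _ (by omega)



-- ===== VERDICT (by name: the statement is the Claim_ definition above) =====
theorem word_to_keyword_spec : Claim_equal_word_to_keyword := by
  intro s key _ hpre
  unfold Spec_word_to_keyword word_to_keyword word_to_keyword_alt
  rcases hpre with hkey | hs
  · have hk : 0 < key.toList.length := by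
      cases h : key.toList with
      | nil => exact absurd (by simpa using congrArg String.ofList h) hkey
      | cons a l => simp
    have := loopA_eq key.toList hk s.toList.length s.toList le_rfl 0 [] le_rfl
    rw [Int.zero_emod] at this
    rw [this]
  · subst hs
    simp [loopA]

theorem word_to_keyword_raises : Claim_raises_word_to_keyword := by
  unfold Claim_raises_word_to_keyword
  constructor
  · intro s key _ hr hp
    rcases hp with h | h
    · exact h hr.1
    · exact hr.2.1 h
  · decide

-- self-check: the raise-region witness really lies inside Raises_word_to_keyword
theorem word_to_keyword_raises_ok :
    Raises_word_to_keyword (pvRaiseWitness_word_to_keyword.1) (pvRaiseWitness_word_to_keyword.2) :=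
  word_to_keyword_raises.2.2.1
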